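-- pv_equiv track=rewrite | github.com/Akamemz/King_Pieces_demo | app/pages/new_ver_king_chessboard_app.py | grid_regions
-- ===== SOURCE A (Python) =====
-- import math
-- from typing import Dict, List, Tuple
--
-- Region = Tuple[int, int, int, int]  # (r0, r1, c0, c1)
--
-- def grid_regions(n: int, k: int, rows: int = None, cols: int = None) -> List[Region]:
--     if rows is None or cols is None:
--         cols = math.ceil(math.sqrt(k)) if cols is None else cols
--         rows = math.ceil(k / cols) if rows is None else rows
--     if rows * cols < k:
--         raise ValueError("rows*cols must be ≥ k")
--
--     moat_rows = rows - 1
--     moat_cols = cols - 1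
--     usable_r = n - moat_rows
--     usable_c = n - moat_cols
--     if usable_r <= 0 or usable_c <= 0:
--         return []
--
--     base_h, extra_h = divmod(usable_r, rows)
--     base_w, extra_w = divmod(usable_c, cols)
--
--     heights = [base_h + (1 if i < extra_h else 0) for i in range(rows)]
--     widths  = [base_w + (1 if j < extra_w else 0) for j in range(cols)]
--
--     regions: List[Region] = []
--     r = 0
--     for i in range(rows):
--         r0 = r
--         r1 = r0 + heights[i] - 1
--         c = 0
--         for j in range(cols):
--             c0 = c
--             c1 = c0 + widths[j] - 1
--             regions.append((r0, r1, c0, c1))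
--             c = c1 + 2  # moat col
--         r = r1 + 2  # moat row
--     return regions[:k]
-- ===== SOURCE B (Python) =====
-- import math
-- from typing import List, Tuple
--
-- Region = Tuple[int, int, int, int]
--
--
-- def _span(i: int, base: int, extra: int) -> Tuple[int, int]:
--     # Closed form: i full stripes of (base+1) cells-plus-moat before stripe i,
--     # plus one extra cell for each of the first min(i, extra) stripes.
--     start = i * (base + 1) + min(i, extra)
--     return start, start + base + (1 if i < extra else 0) - 1
--
--
-- def grid_regions(n: int, k: int, rows: int = None, cols: int = None) -> List[Region]:
--     if rows is None or cols is None: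
--         cols = math.ceil(math.sqrt(k)) if cols is None else cols
--         rows = math.ceil(k / cols) if rows is None else rows
--     if rows * cols < k:
--         raise ValueError("rows*cols must be ≥ k")
--
--     usable_r = n - (rows - 1)
--     usable_c = n - (cols - 1)
--     if usable_r <= 0 or usable_c <= 0:
--         return []
--
--     base_h, extra_h = divmod(usable_r, rows)
--     base_w, extra_w = divmod(usable_c, cols)
--
--     row_spans = [_span(i, base_h, extra_h) for i in range(rows)]
--     col_spans = [_span(j, base_w, extra_w) for j in range(cols)]
--     return [rs + cs for rs in row_spans for cs in col_spans][:k]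
-- ===== Notes on version B (the rewrite author's own statement) =====
-- stated objective: simpler
-- what changed: Replaces the nested loop with running row/column cursors and precomputed heights/widths lists by a direct closed-form formula for each region's coordinates (start_i = i*(base+1) + min(i, extra)), emitted as a Cartesian-product comprehension.
import Mathlib
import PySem

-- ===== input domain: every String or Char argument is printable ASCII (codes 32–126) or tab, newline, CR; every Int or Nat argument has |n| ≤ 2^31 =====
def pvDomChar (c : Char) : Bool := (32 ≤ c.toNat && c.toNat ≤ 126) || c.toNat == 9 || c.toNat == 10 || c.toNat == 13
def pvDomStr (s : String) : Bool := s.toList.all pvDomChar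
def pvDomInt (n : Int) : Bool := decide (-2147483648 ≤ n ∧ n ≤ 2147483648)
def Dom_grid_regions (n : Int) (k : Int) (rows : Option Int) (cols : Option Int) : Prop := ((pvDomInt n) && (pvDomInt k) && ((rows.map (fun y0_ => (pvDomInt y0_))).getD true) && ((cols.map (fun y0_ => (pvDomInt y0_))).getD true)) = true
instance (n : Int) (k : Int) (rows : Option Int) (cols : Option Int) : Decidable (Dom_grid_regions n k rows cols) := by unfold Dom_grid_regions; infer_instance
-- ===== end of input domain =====

-- B replaces A's nested loop with running row/column cursors and precomputed heights/widths
-- lists by a closed-form formula for each region's coordinates, emitted as a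
-- Cartesian-product comprehension (objective: simpler).

-- shared helpers for the default rows/cols derivation (both Pythons share those source lines):
-- math.ceil(math.sqrt(k)) — exact as an integer ceil-sqrt for 0 ≤ k ≤ 2^31 (float sqrt is
-- correctly rounded and cannot round across an integer in that range; k < 0 raises ValueError,
-- excluded by Pre_)
def pvCeilSqrt (k : Int) : Int :=
  let s : Int := (Nat.sqrt k.toNat : Int)
  if s * s < k then s + 1 else s


-- math.ceil(k / c) — exact as -((-k) // c) for |k|, |c| ≤ 2^31 (the float quotient cannot round
-- across an integer there; c = 0 raises ZeroDivisionError, excluded by Pre_)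
def pvCeilDiv (k c : Int) : Int := -(PySem.Int.floordiv (-k) c)


-- ===== PORT A =====
-- 'if rows is None or cols is None: …' only assigns the None ones, so Option.getD is exact;
-- the two branches Python raises on (ValueError / ZeroDivisionError) return [] here and are
-- excluded by Pre_
def grid_regions (n : Int) (k : Int) (rows : Option Int) (cols : Option Int) : List (Int × Int × Int × Int) :=
  let c0 := cols.getD (pvCeilSqrt k)
  let r0 := rows.getD (pvCeilDiv k c0)
  if r0 * c0 < k then []
  else
    let moat_rows := r0 - 1
    let moat_cols := c0 - 1
    let usable_r := n - moat_rows
    let usable_c := n - moat_cols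
    if usable_r ≤ 0 ∨ usable_c ≤ 0 then []
    else
      let base_h := PySem.Int.floordiv usable_r r0
      let extra_h := PySem.Int.mod usable_r r0
      let base_w := PySem.Int.floordiv usable_c c0
      let extra_w := PySem.Int.mod usable_c c0
      let heights := (PySem.List.pyRange 0 r0 1).map (fun i => base_h + (if i < extra_h then 1 else 0))
      let widths := (PySem.List.pyRange 0 c0 1).map (fun j => base_w + (if j < extra_w then 1 else 0))
      let st := (PySem.List.pyRange 0 r0 1).foldl
        (fun (st : List (Int × Int × Int × Int) × Int) i =>
          let r1 := st.2 + PySem.List.pyGetD heights i 0 - 1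
          let st2 := (PySem.List.pyRange 0 c0 1).foldl
            (fun (st2 : List (Int × Int × Int × Int) × Int) j =>
              let c1 := st2.2 + PySem.List.pyGetD widths j 0 - 1
              (st2.1 ++ [(st.2, r1, st2.2, c1)], c1 + 2)) (st.1, 0)
          (st2.1, r1 + 2)) ([], 0)
      PySem.List.slice st.1 none (some k)


-- ===== PORT B =====
-- _span(i, base, extra) from Source B
def pvSpan (i base extra : Int) : Int × Int :=
  let s := i * (base + 1) + min i extra
  (s, s + base + (if i < extra then 1 else 0) - 1)


def grid_regions_alt (n : Int) (k : Int) (rows : Option Int) (cols : Option Int) : List (Int × Int × Int × Int) :=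
  let c0 := cols.getD (pvCeilSqrt k)
  let r0 := rows.getD (pvCeilDiv k c0)
  if r0 * c0 < k then []
  else
    let usable_r := n - (r0 - 1)
    let usable_c := n - (c0 - 1)
    if usable_r ≤ 0 ∨ usable_c ≤ 0 then []
    else
      let base_h := PySem.Int.floordiv usable_r r0
      let extra_h := PySem.Int.mod usable_r r0
      let base_w := PySem.Int.floordiv usable_c c0
      let extra_w := PySem.Int.mod usable_c c0
      let row_spans := (PySem.List.pyRange 0 r0 1).map (fun i => pvSpan i base_h extra_h)
      let col_spans := (PySem.List.pyRange 0 c0 1).map (fun j => pvSpan j base_w extra_w)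
      PySem.List.slice
        (row_spans.flatMap (fun rs => col_spans.map (fun cs => (rs.1, rs.2, cs.1, cs.2))))
        none (some k)


-- ===== PRECONDITION & SPEC =====
-- Pre_ excludes exactly the inputs on which Python A raises: math.sqrt of a negative k
-- (ValueError), a zero divisor in ceil(k/cols) or in divmod (ZeroDivisionError), and the
-- explicit 'rows*cols must be ≥ k' ValueError.
def Pre_grid_regions (n : Int) (k : Int) (rows : Option Int) (cols : Option Int) : Prop :=
  (cols = none → 0 ≤ k) ∧
  (rows = none → cols.getD (pvCeilSqrt k) ≠ 0) ∧
  (let C := cols.getD (pvCeilSqrt k)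
   let R := rows.getD (pvCeilDiv k C)
   k ≤ R * C ∧ (n - (R - 1) ≤ 0 ∨ n - (C - 1) ≤ 0 ∨ (R ≠ 0 ∧ C ≠ 0)))

instance (n : Int) (k : Int) (rows : Option Int) (cols : Option Int) : Decidable (Pre_grid_regions n k rows cols) := by unfold Pre_grid_regions; infer_instance

def pvWitness_grid_regions : Int × Int × Option Int × Option Int := (8, 5, some 2, some 3)

def Spec_grid_regions (n : Int) (k : Int) (rows : Option Int) (cols : Option Int) (out : List (Int × Int × Int × Int)) : Prop := out = grid_regions_alt n k rows cols
instance (n : Int) (k : Int) (rows : Option Int) (cols : Option Int) (out : List (Int × Int × Int × Int)) : Decidable (Spec_grid_regions n k rows cols out) := by unfold Spec_grid_regions; infer_instance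

-- ===== CLAIM (what is proved, stated in full; the proofs are below) =====
def Claim_equal_grid_regions : Prop := ∀ (n : Int) (k : Int) (rows : Option Int) (cols : Option Int), Dom_grid_regions n k rows cols → Pre_grid_regions n k rows cols → Spec_grid_regions n k rows cols (grid_regions n k rows cols)

-- ===== LEMMAS AND PROOFS =====

-- range(m) over ints, any sign of the bound
theorem pvRange_eq (r : Int) :
    PySem.List.pyRange 0 r 1 = (List.range r.toNat).map (Nat.cast : Nat → Int) := by
  by_cases h : r ≤ 0
  · have h0 : r.toNat = 0 := by omega
    rw [h0, List.range_zero, List.map_nil, List.eq_nil_iff_forall_not_mem]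
    intro x hx
    have := PySem.List.mem_pyRange_one.mp hx
    omega
  · have h1 : r = (r.toNat : Int) := by omega
    conv_lhs => rw [h1, PySem.List.pyRange_zero_natCast]


theorem pvFlatMap_singleton {α β : Type} (g : α → β) (l : List α) :
    l.flatMap (fun x => [g x]) = l.map g := by
  induction l with
  | nil => rfl
  | cons x xs ih => simp [ih]


-- the cursor loop: appending a block per stripe and advancing the cursor by stripe size + 1 moat
-- equals the closed-form pvSpan starts
theorem pvFoldSpanList {α : Type} (f : Int → Int → List α) (w : Int → Int)
    (base extra : Int) (hex : 0 ≤ extra) (m : Nat)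
    (hw : ∀ i : Nat, i < m → w (i : Int) = base + (if (i : Int) < extra then 1 else 0))
    (regs : List α) :
    List.foldl (fun st i => (st.1 ++ f st.2 (st.2 + w i - 1), st.2 + w i - 1 + 2))
        ((regs, 0) : List α × Int) ((List.range m).map (Nat.cast : Nat → Int))
      = (regs ++ List.flatMap
            (fun i : Nat => f (pvSpan (i : Int) base extra).1 (pvSpan (i : Int) base extra).2)
            (List.range m),
         (m : Int) * (base + 1) + min (m : Int) extra) := by
  induction m with
  | zero => simp; omega
  | succ m ih =>
    have hw' : ∀ i : Nat, i < m → w (i : Int) = base + (if (i : Int) < extra then 1 else 0) :=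
      fun i hi => hw i (by omega)
    rw [List.range_succ, List.map_append, List.foldl_append, ih hw', List.flatMap_append]
    simp only [List.map_cons, List.map_nil, List.foldl_cons, List.foldl_nil,
      List.flatMap_cons, List.flatMap_nil, List.append_nil, Prod.mk.injEq]
    rw [hw m (by omega)]
    constructor
    · rw [List.append_assoc]
      congr 2
      have h1 : (m : Int) * (base + 1) + min (m : Int) extra = (pvSpan (m : Int) base extra).1 := by
        simp [pvSpan]
      rw [h1]
      have h2 : (pvSpan (m : Int) base extra).1 +
          (base + (if (m : Int) < extra then 1 else 0)) - 1 = (pvSpan (m : Int) base extra).2 := by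
        simp [pvSpan]; split_ifs <;> omega
      rw [h2]
    · have hring : ((m : Int) + 1) * (base + 1) = (m : Int) * (base + 1) + base + 1 := by ring
      push_cast
      rw [hring]
      split_ifs <;> omega

theorem pvFoldl_fst_const {β : Type} (l : List Int) (g : List β × Int → Int → Int) :
    ∀ st : List β × Int,
      (l.foldl (fun (st : List β × Int) i => (st.1, g st i)) st).1 = st.1 := by
  induction l with
  | nil => intro st; rfl
  | cons x xs ih => intro st; exact ih _


theorem grid_regions_eq_alt (n : Int) (k : Int) (rows : Option Int) (cols : Option Int)
    (hpre : Pre_grid_regions n k rows cols) :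
    grid_regions n k rows cols = grid_regions_alt n k rows cols := by
  obtain ⟨hk, hR0, hPre⟩ := hpre
  simp only at hPre
  simp only [grid_regions, grid_regions_alt]
  set c0 := cols.getD (pvCeilSqrt k) with hc0
  set r0 := rows.getD (pvCeilDiv k c0) with hr0
  by_cases h1 : r0 * c0 < k
  · simp [h1]
  · simp only [h1, if_false]
    by_cases h2 : n - (r0 - 1) ≤ 0 ∨ n - (c0 - 1) ≤ 0
    · simp only [if_pos h2]
    · simp only [h2, if_false]
      push_neg at h2
      by_cases hr : r0 ≤ 0
      · have he : PySem.List.pyRange 0 r0 1 = [] := by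
          rw [pvRange_eq]
          have h0 : r0.toNat = 0 := by omega
          rw [h0]; simp
        rw [he]
        simp
      · by_cases hc : c0 ≤ 0
        · have hce : PySem.List.pyRange 0 c0 1 = [] := by
            rw [pvRange_eq]
            have h0 : c0.toNat = 0 := by omega
            rw [h0]; simp
          rw [hce]
          simp only [List.foldl_nil, List.map_nil]
          rw [pvFoldl_fst_const _ (fun st i =>
            st.2 + PySem.List.pyGetD ((PySem.List.pyRange 0 r0 1).map
              (fun i => PySem.Int.floordiv (n - (r0 - 1)) r0 +
                (if i < PySem.Int.mod (n - (r0 - 1)) r0 then 1 else 0))) i 0 - 1 + 2) ([], 0)]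
          have : List.flatMap (fun (_ : Int × Int) => ([] : List (Int × Int × Int × Int)))
              ((PySem.List.pyRange 0 r0 1).map (fun i => pvSpan i (PySem.Int.floordiv (n - (r0 - 1)) r0) (PySem.Int.mod (n - (r0 - 1)) r0))) = [] := by
            simp [List.flatMap_eq_nil_iff]
          rw [this]
        · push_neg at hr hc
          obtain ⟨h2r, h2c⟩ := h2
          set bh := PySem.Int.floordiv (n - (r0 - 1)) r0 with hbh
          set eh := PySem.Int.mod (n - (r0 - 1)) r0 with heh
          set bw := PySem.Int.floordiv (n - (c0 - 1)) c0 with hbw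
          set ew := PySem.Int.mod (n - (c0 - 1)) c0 with hew
          have heh0 : 0 ≤ eh := PySem.Int.mod_nonneg _ hr
          have hew0 : 0 ≤ ew := PySem.Int.mod_nonneg _ hc
          set rN := r0.toNat with hrN
          set cN := c0.toNat with hcN
          have hr0N : r0 = (rN : Int) := by omega
          have hc0N : c0 = (cN : Int) := by omega
          rw [pvRange_eq r0, pvRange_eq c0]
          have hH : ∀ i : Nat, i < rN →
              PySem.List.pyGetD (((List.range rN).map (Nat.cast : Nat → Int)).map
                (fun i => bh + (if i < eh then 1 else 0))) (i : Int) 0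
              = bh + (if (i : Int) < eh then 1 else 0) := by
            intro i hi
            rw [← PySem.List.pyRange_zero_natCast]
            exact PySem.List.pyGetD_map_pyRange _ _ _ _ hi
          have hW : ∀ j : Nat, j < cN →
              PySem.List.pyGetD (((List.range cN).map (Nat.cast : Nat → Int)).map
                (fun j => bw + (if j < ew then 1 else 0))) (j : Int) 0
              = bw + (if (j : Int) < ew then 1 else 0) := by
            intro j hj
            rw [← PySem.List.pyRange_zero_natCast]
            exact PySem.List.pyGetD_map_pyRange _ _ _ _ hj
          -- the inner loop, in closed form
          have hinner : ∀ (regs : List (Int × Int × Int × Int)) (r r1 : Int),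
              List.foldl (fun (st2 : List (Int × Int × Int × Int) × Int) j =>
                  (st2.1 ++ [(r, r1, st2.2,
                      st2.2 + PySem.List.pyGetD (((List.range cN).map (Nat.cast : Nat → Int)).map
                        (fun j => bw + (if j < ew then 1 else 0))) j 0 - 1)],
                   st2.2 + PySem.List.pyGetD (((List.range cN).map (Nat.cast : Nat → Int)).map
                        (fun j => bw + (if j < ew then 1 else 0))) j 0 - 1 + 2))
                ((regs, 0) : List (Int × Int × Int × Int) × Int)
                ((List.range cN).map (Nat.cast : Nat → Int))
              = (regs ++ List.flatMap
                    (fun j : Nat => [(r, r1, (pvSpan (j : Int) bw ew).1, (pvSpan (j : Int) bw ew).2)])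
                    (List.range cN),
                 (cN : Int) * (bw + 1) + min (cN : Int) ew) := by
            intro regs r r1
            exact pvFoldSpanList (fun a b => [(r, r1, a, b)]) _ bw ew hew0 cN hW regs
          rw [PySem.List.foldl_congr_mem _ _
            (fun (st : List (Int × Int × Int × Int) × Int) i =>
              (st.1 ++ List.flatMap
                  (fun j : Nat => [(st.2,
                    st.2 + PySem.List.pyGetD (((List.range rN).map (Nat.cast : Nat → Int)).map
                      (fun i => bh + (if i < eh then 1 else 0))) i 0 - 1,
                    (pvSpan (j : Int) bw ew).1, (pvSpan (j : Int) bw ew).2)]) (List.range cN),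
               st.2 + PySem.List.pyGetD (((List.range rN).map (Nat.cast : Nat → Int)).map
                      (fun i => bh + (if i < eh then 1 else 0))) i 0 - 1 + 2)) _
            (fun acc x _ => by rw [hinner acc.1 acc.2 _])]
          rw [pvFoldSpanList
            (fun a b => List.flatMap
              (fun j : Nat => [(a, b, (pvSpan (j : Int) bw ew).1, (pvSpan (j : Int) bw ew).2)])
              (List.range cN))
            _ bh eh heh0 rN hH []]
          rw [List.flatMap_map, List.nil_append]
          congr 1
          dsimp only
          simp only [pvFlatMap_singleton, List.map_map, List.flatMap_map]
          rfl

-- ===== VERDICT (by name: the statement is the Claim_ definition above) =====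
theorem grid_regions_spec : Claim_equal_grid_regions := by
  intro n k rows cols _ hpre
  unfold Spec_grid_regions
  exact grid_regions_eq_alt n k rows cols hpre
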